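-- pv_equiv track=rewrite | github.com/AJO-Python/AOC-2021 | day_03/sol_03.py | new_calc_epsilon
-- ===== SOURCE A (Python) =====
-- def new_calc_epsilon(codes):
--     epsilon = [[0, 0] for _ in codes[0]]
--     # get occurence of 0 and 1 in each bit position
--     for code in codes:
--         for i in range(len(code)):
--             if code[i] == "0":
--                 epsilon[i][0] += 1
--             else:
--                 epsilon[i][1] += 1
--     final_epsilon = ["0" if bit[0] < bit[1] else "1" for bit in epsilon]
--     return "".join(final_epsilon)
-- ===== SOURCE B (Python) =====
-- def new_calc_epsilon(codes):
--     bits = []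
--     for i in range(len(codes[0])):
--         column = [code[i] for code in codes if i < len(code)]
--         zeros = column.count("0")
--         bits.append("0" if zeros < len(column) - zeros else "1")
--     return "".join(bits)
-- ===== Notes on version B (the rewrite author's own statement) =====
-- stated objective: idiomatic
-- what changed: Column-major: for each bit position extract the column of the (possibly jagged) rows and count its zeros once, deriving ones as the column size minus zeros, instead of A's row-major accumulation into a per-position [zeros,ones] table; Pre_ excludes only inputs where A raises IndexError (empty list, or a code longer than the first).
import Mathlib
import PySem

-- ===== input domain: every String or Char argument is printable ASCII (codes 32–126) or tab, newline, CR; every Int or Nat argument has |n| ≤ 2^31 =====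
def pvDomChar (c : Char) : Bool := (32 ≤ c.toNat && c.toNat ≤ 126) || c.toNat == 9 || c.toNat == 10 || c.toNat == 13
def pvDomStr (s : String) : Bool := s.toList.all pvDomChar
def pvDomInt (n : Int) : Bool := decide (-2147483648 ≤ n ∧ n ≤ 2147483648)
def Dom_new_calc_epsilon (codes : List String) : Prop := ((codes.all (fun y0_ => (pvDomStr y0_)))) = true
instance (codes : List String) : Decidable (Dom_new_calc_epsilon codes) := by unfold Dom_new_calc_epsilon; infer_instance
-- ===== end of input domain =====

-- B is column-major: for each bit position it extracts the column of the (possibly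
-- jagged) rows and counts its zeros once (ones = column size - zeros), instead of
-- A's row-major accumulation into a per-position [zeros,ones] table.

-- ===== PORT A =====
-- the two branches 'epsilon[i][0] += 1' / 'epsilon[i][1] += 1', chosen by code[i] == "0"
def pvUpd (ch : Char) (p : Int × Int) : Int × Int :=
  if ch = '0' then (p.1 + 1, p.2) else (p.1, p.2 + 1)

-- inner loop of A: 'for i in range(len(code)): …' updating the epsilon table in place
def pvInner (c : List Char) (e : List (Int × Int)) : List (Int × Int) :=
  (List.range c.length).foldl (fun e i => e.modify i (pvUpd (c.getD i ' '))) e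

def new_calc_epsilon (codes : List String) : String :=
  let eps0 : List (Int × Int) := (codes.headD "").toList.map (fun _ => ((0:Int), (0:Int)))
  let eps := codes.foldl (fun e code => pvInner code.toList e) eps0
  String.ofList (eps.map (fun bit => if bit.1 < bit.2 then '0' else '1'))

-- ===== PORT B =====
def new_calc_epsilon_alt (codes : List String) : String :=
  String.ofList ((List.range (codes.headD "").toList.length).map (fun i =>
    let column := (codes.filter (fun code => decide (i < code.toList.length))).map
      (fun code => code.toList.getD i ' ')
    let zeros : Int := (column.count '0' : Int)
    if zeros < (column.length : Int) - zeros then '0' else '1'))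

-- ===== PRECONDITION & SPEC =====
-- Pre_ excludes exactly the inputs where Python A raises IndexError: empty codes
-- (codes[0]) and lists where some code is longer than codes[0] (epsilon[i] out of range).
def Pre_new_calc_epsilon (codes : List String) : Prop :=
  codes ≠ [] ∧ ∀ c ∈ codes, c.toList.length ≤ (codes.headD "").toList.length
instance (codes : List String) : Decidable (Pre_new_calc_epsilon codes) := by
  unfold Pre_new_calc_epsilon; infer_instance

def pvWitness_new_calc_epsilon : List String := ["010", "110", "10"]

def Spec_new_calc_epsilon (codes : List String) (out : String) : Prop := out = new_calc_epsilon_alt codes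
instance (codes : List String) (out : String) : Decidable (Spec_new_calc_epsilon codes out) := by unfold Spec_new_calc_epsilon; infer_instance

-- ===== CLAIM =====
def Claim_equal_new_calc_epsilon : Prop := ∀ (codes : List String), Dom_new_calc_epsilon codes → Pre_new_calc_epsilon codes → Spec_new_calc_epsilon codes (new_calc_epsilon codes)

-- ===== LEMMAS AND PROOFS =====

theorem foldl_modify_length (g : Nat → Int × Int → Int × Int) :
    ∀ (is : List Nat) (e : List (Int × Int)),
      (is.foldl (fun e i => e.modify i (g i)) e).length = e.length := by
  intro is
  induction is with
  | nil => intro e; rfl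
  | cons i is ih => intro e; simpa using ih (e.modify i (g i))

theorem range_fold_modify_get? (g : Nat → Int × Int → Int × Int) :
    ∀ (m : Nat) (e : List (Int × Int)) (j : Nat),
      ((List.range m).foldl (fun e i => e.modify i (g i)) e)[j]?
        = if j < m then e[j]?.map (g j) else e[j]? := by
  intro m
  induction m with
  | zero => intro e j; simp
  | succ m ih =>
      intro e j
      rw [List.range_succ, List.foldl_append, List.foldl_cons, List.foldl_nil,
        List.getElem?_modify, ih]
      by_cases hjm : j = m
      · subst hjm
        simp
      · by_cases hjm2 : j < m
        · have h1 : j < m + 1 := by omega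
          simp [hjm2, h1]
          cases e[j]? <;> simp [Ne.symm hjm]
        · have h1 : ¬ j < m + 1 := by omega
          simp [hjm2, h1]
          cases e[j]? <;> simp [Ne.symm hjm]

theorem pvInner_length (c : List Char) (e : List (Int × Int)) :
    (pvInner c e).length = e.length := foldl_modify_length _ _ e

theorem pvInner_getD (c : List Char) (e : List (Int × Int)) (j : Nat) (hj : j < e.length) :
    (pvInner c e).getD j (0, 0)
      = if j < c.length then pvUpd (c.getD j ' ') (e.getD j (0, 0)) else e.getD j (0, 0) := by
  rw [List.getD_eq_getElem?_getD, pvInner, range_fold_modify_get?,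
    List.getElem?_eq_getElem hj]
  by_cases h : j < c.length <;>
    simp [h, List.getD_eq_getElem?_getD, List.getElem?_eq_getElem hj]

theorem length_filter_split (p q : String → Bool) :
    ∀ (l : List String),
      (l.filter p).length
        = (l.filter (fun x => p x && q x)).length + (l.filter (fun x => p x && !q x)).length := by
  intro l
  induction l with
  | nil => rfl
  | cons x xs ih =>
      by_cases hp : p x <;> by_cases hq : q x <;>
        simp [List.filter_cons, hp, hq, ih] <;> omega

theorem outer_fold_getD :
    ∀ (codes : List String) (e : List (Int × Int)) (j : Nat), j < e.length →
      (codes.foldl (fun e code => pvInner code.toList e) e).getD j (0, 0)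
        = ((e.getD j (0, 0)).1
            + ((codes.filter (fun code => decide (j < code.toList.length) && (code.toList.getD j ' ' == '0'))).length : Int),
           (e.getD j (0, 0)).2
            + ((codes.filter (fun code => decide (j < code.toList.length) && !(code.toList.getD j ' ' == '0'))).length : Int)) := by
  intro codes
  induction codes with
  | nil => intro e j hj; simp
  | cons c cs ih =>
      intro e j hj
      rw [List.foldl_cons]
      rw [ih (pvInner c.toList e) j (by rw [pvInner_length]; exact hj)]
      rw [pvInner_getD c.toList e j hj]
      by_cases hlt : j < c.toList.length
      · have hlt' : j < c.length := by rwa [String.length_toList] at hlt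
        by_cases h0 : c.toList.getD j ' ' = '0' <;>
          · rw [List.getD_eq_getElem _ _ hlt] at h0
            simp [hlt, hlt', h0, pvUpd, List.filter_cons,
              List.getD_eq_getElem?_getD, List.getElem?_eq_getElem hlt]
            all_goals (push_cast; ring)
      · have hlt' : ¬ j < c.length := by rwa [String.length_toList] at hlt
        simp [hlt, hlt', List.filter_cons]

theorem outer_fold_length (codes : List String) (e : List (Int × Int)) :
    (codes.foldl (fun e code => pvInner code.toList e) e).length = e.length := by
  induction codes generalizing e with
  | nil => rfl
  | cons c cs ih => rw [List.foldl_cons, ih, pvInner_length]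

-- ===== VERDICT =====
theorem new_calc_epsilon_spec : Claim_equal_new_calc_epsilon := by
  intro codes _ _
  unfold Spec_new_calc_epsilon new_calc_epsilon new_calc_epsilon_alt
  apply congrArg String.ofList
  apply List.ext_getElem
  · simp [outer_fold_length]
  · intro j h1 h2
    have hn : j < (codes.headD "").toList.length := by
      simpa [outer_fold_length] using h1
    have hj0 : j < ((codes.headD "").toList.map (fun _ => ((0:Int), (0:Int)))).length := by
      simpa using hn
    rw [List.getElem_map, List.getElem_map, List.getElem_range]
    rw [← List.getD_eq_getElem _ ((0:Int),(0:Int)) (by simpa [outer_fold_length] using h1)]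
    rw [outer_fold_getD codes _ j hj0]
    have hz : ((codes.headD "").toList.map (fun _ => ((0:Int), (0:Int)))).getD j (0, 0) = ((0:Int), (0:Int)) := by
      rw [List.getD_eq_getElem _ _ hj0]; simp
    rw [hz]
    dsimp only
    -- B's zero count of the extracted column = A's in-range-and-zero filter count
    have hcount : ((codes.filter (fun code => decide (j < code.toList.length))).map
          (fun code => code.toList.getD j ' ')).count '0'
        = (codes.filter (fun code => decide (j < code.toList.length)
            && (code.toList.getD j ' ' == '0'))).length := by
      rw [List.count_eq_countP, List.countP_map, List.countP_eq_length_filter,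
        List.filter_filter]
      apply congrArg List.length
      apply List.filter_congr
      intro c _
      simp [Function.comp, Bool.and_comm]
    -- and the column size splits into A's two counts
    have htot := length_filter_split
      (fun code => decide (j < code.toList.length))
      (fun code => code.toList.getD j ' ' == '0') codes
    beta_reduce at htot
    rw [hcount, List.length_map]
    split_ifs with ha hb hc
    · rfl
    · exfalso; push_cast at ha hb htot ⊢; omega
    · exfalso; push_cast at ha hc htot ⊢; omega
    · rfl
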